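-- pv_equiv track=rewrite | github.com/pike-msonda/sentiment_analysis | libs/twitterapi.py | strip_all_entities
-- ===== SOURCE A (Python) =====
-- import re,string
--
-- def strip_all_entities(text):
--     entity_prefixes = ['@','#','RT']
--     for separator in  string.punctuation:
--         if separator not in entity_prefixes :
--             text = text.replace(separator,' ')
--     words = []
--     for word in text.split():
--         word = word.strip()
--         if word:
--             if word[0] not in entity_prefixes:
--                 words.append(word)
--     return ' '.join(words)
-- ===== SOURCE B (Python) =====
-- import string
--
-- _DELIMS = set(string.punctuation) - {'@', '#'}
--
-- def strip_all_entities(text):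
--     # One streaming pass: cut tokens at punctuation/whitespace, keep tokens
--     # whose first character is not an entity prefix, join with single spaces.
--     kept = []
--     cur = ''
--     for ch in text:
--         if ch in _DELIMS or ch.isspace():
--             if cur and cur[0] != '@' and cur[0] != '#':
--                 kept.append(cur)
--             cur = ''
--         else:
--             cur += ch
--     if cur and cur[0] != '@' and cur[0] != '#':
--         kept.append(cur)
--     return ' '.join(kept)
-- ===== Notes on version B (the rewrite author's own statement) =====
-- stated objective: alternative
-- what changed: Replaces A's 30 successive str.replace passes plus a split/strip/filter loop with a single character-by-character streaming scan that cuts tokens at punctuation/whitespace and filters entity-prefixed tokens on the fly.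
import Mathlib
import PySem

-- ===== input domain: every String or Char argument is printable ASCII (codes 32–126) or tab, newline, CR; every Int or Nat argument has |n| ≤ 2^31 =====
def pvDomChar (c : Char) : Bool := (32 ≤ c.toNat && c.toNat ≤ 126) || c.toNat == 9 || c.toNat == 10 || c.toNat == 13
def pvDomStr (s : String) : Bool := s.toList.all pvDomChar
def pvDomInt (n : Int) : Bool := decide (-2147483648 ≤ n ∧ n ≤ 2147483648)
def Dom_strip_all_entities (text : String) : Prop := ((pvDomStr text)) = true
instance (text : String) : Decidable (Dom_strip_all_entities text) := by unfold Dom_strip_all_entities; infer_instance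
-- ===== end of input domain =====

-- B fuses A's 30 replace passes plus split/filter into one character-by-character scan (objective: alternative single-pass decomposition).

-- ===== PORT A =====
-- string.punctuation
def pvPunctuation : List Char := "!\"#$%&'()*+,-./:;<=>?@[\\]^_`{|}~".toList

def strip_all_entities (text : String) : String :=
  -- 'RT' ∈ entity_prefixes can never equal a one-character string, so 'x in entity_prefixes'
  -- on a single character is exactly x = '@' ∨ x = '#'
  let t := pvPunctuation.foldl (fun t sep =>
    if sep = '@' ∨ sep = '#' then t
    else PySem.Str.replace t (String.ofList [sep]) " ") text
  let words := (PySem.Str.split₀ t).foldl (fun ws w =>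
    let w := PySem.Str.strip w
    if w ≠ "" then
      if PySem.Str.pyGet? w 0 = some '@' ∨ PySem.Str.pyGet? w 0 = some '#' then ws
      else ws ++ [w]
    else ws) []
  PySem.Str.join " " words

-- ===== PORT B =====
-- set(string.punctuation) - {'@', '#'}
def pvDelims : List Char := "!\"$%&'()*+,-./:;<=>?[\\]^_`{|}~".toList

def pvIsCut (c : Char) : Bool := (c ∈ pvDelims) || PySem.Chars.isspace c

def pvFlush (cur : List Char) (kept : List String) : List String :=
  if cur ≠ [] ∧ cur.head? ≠ some '@' ∧ cur.head? ≠ some '#' then kept ++ [String.ofList cur]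
  else kept

def pvScan : List Char → List Char → List String → List String
  | [], cur, kept => pvFlush cur kept
  | c :: cs, cur, kept =>
      if pvIsCut c then pvScan cs [] (pvFlush cur kept)
      else pvScan cs (cur ++ [c]) kept

def strip_all_entities_alt (text : String) : String :=
  PySem.Str.join " " (pvScan text.toList [] [])

-- ===== PRECONDITION & SPEC =====
def Spec_strip_all_entities (text : String) (out : String) : Prop := out = strip_all_entities_alt text
instance (text : String) (out : String) : Decidable (Spec_strip_all_entities text out) := by unfold Spec_strip_all_entities; infer_instance

-- ===== CLAIM (what is proved, stated in full; the proofs are below) =====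
def Claim_equal_strip_all_entities : Prop := ∀ (text : String), Dom_strip_all_entities text → Spec_strip_all_entities text (strip_all_entities text)

-- ===== LEMMAS AND PROOFS =====

-- the char substitution A's replace-loop performs
def pvF (c : Char) : Char := if c ∈ pvDelims then ' ' else c

-- A's keep-filter on raw token lists
def pvWordsA (ts : List (List Char)) : List String :=
  (ts.filter (fun t => !(t.head? == some '@' || t.head? == some '#'))).map String.ofList

lemma pv_replace_go_single (a b : Char) :
    ∀ (fuel : Nat) (l acc : List Char), l.length ≤ fuel →
      PySem.Chars.replace.go [a] [b] fuel l acc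
        = acc.reverse ++ l.map (fun c => if c = a then b else c) := by
  intro fuel
  induction fuel with
  | zero => intro l acc h; simp at h; simp [h, PySem.Chars.replace.go]
  | succ n ih =>
    intro l acc h
    cases l with
    | nil => simp [PySem.Chars.replace.go]
    | cons c t =>
      simp only [PySem.Chars.replace.go, List.isPrefixOf]
      by_cases hc : c = a
      · simp [hc, ih t _ (by simpa using h)]
      · have : (a == c) = false := by simp [Ne.symm hc]
        simp [this, hc, ih t _ (by simpa using h)]

lemma pv_replace_single (a b : Char) (l : List Char) :
    PySem.Chars.replace l [a] [b] = l.map (fun c => if c = a then b else c) := by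
  simp [PySem.Chars.replace, pv_replace_go_single a b l.length l [] le_rfl]

lemma pv_foldA_toList (seps : List Char) :
    ∀ (t : String),
      (seps.foldl (fun t sep =>
        if sep = '@' ∨ sep = '#' then t
        else PySem.Str.replace t (String.ofList [sep]) " ") t).toList
      = seps.foldl (fun l sep =>
          if sep = '@' ∨ sep = '#' then l
          else l.map (fun c => if c = sep then ' ' else c)) t.toList := by
  induction seps with
  | nil => intro t; simp
  | cons a seps ih =>
    intro t
    by_cases ha : a = '@' ∨ a = '#'
    · simp only [List.foldl, if_pos ha, ih]
    · simp only [List.foldl, if_neg ha]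
      rw [ih]
      congr 1
      rw [PySem.Str.toList_replace]
      simp [pv_replace_single]

lemma pv_delims_eq : pvDelims = pvPunctuation.filter (fun c => !(c == '@' || c == '#')) := by decide

lemma pv_fold_map (seps : List Char) (hs : ' ' ∉ seps) :
    ∀ (l : List Char),
      seps.foldl (fun l sep =>
          if sep = '@' ∨ sep = '#' then l
          else l.map (fun c => if c = sep then ' ' else c)) l
      = l.map (fun c => if c ∈ seps.filter (fun c => !(c == '@' || c == '#')) then ' ' else c) := by
  induction seps with
  | nil => intro l; simp
  | cons a seps ih =>
    have hs' : ' ' ∉ seps := fun h => hs (List.mem_cons_of_mem _ h)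
    intro l
    by_cases ha : a = '@' ∨ a = '#'
    · have hfa : (!(a == '@' || a == '#')) = false := by
        rcases ha with h | h <;> simp [h]
      rw [List.foldl_cons, if_pos ha, ih hs' l, List.filter_cons, hfa]
      simp
    · have hfa : (!(a == '@' || a == '#')) = true := by
        simp only [Bool.not_eq_true', Bool.or_eq_false_iff, beq_eq_false_iff_ne]
        exact ⟨fun h => ha (Or.inl h), fun h => ha (Or.inr h)⟩
      rw [List.foldl_cons, if_neg ha, ih hs' _, List.map_map, List.filter_cons, hfa]
      rw [if_pos rfl]
      apply List.map_congr_left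
      intro c _
      simp only [Function.comp_apply]
      by_cases hc : c = a
      · subst hc
        rw [if_pos rfl, ite_self, if_pos List.mem_cons_self]
      · rw [if_neg hc]
        by_cases hm : c ∈ seps.filter (fun c => !(c == '@' || c == '#'))
        · rw [if_pos hm, if_pos (List.mem_cons_of_mem _ hm)]
        · rw [if_neg hm, if_neg (fun h => (List.mem_cons.mp h).elim hc (fun h2 => hm h2))]

lemma pv_tA_toList (text : String) :
    (pvPunctuation.foldl (fun t sep =>
        if sep = '@' ∨ sep = '#' then t
        else PySem.Str.replace t (String.ofList [sep]) " ") text).toList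
      = text.toList.map pvF := by
  rw [pv_foldA_toList, pv_fold_map pvPunctuation (by decide)]
  apply List.map_congr_left
  intro c _
  simp [pvF, pv_delims_eq]

lemma pv_isspace_pvF (c : Char) : PySem.Chars.isspace (pvF c) = pvIsCut c := by
  unfold pvF pvIsCut
  by_cases h : c ∈ pvDelims
  · simp [h]; decide
  · simp [h]

lemma pv_pvF_of_not_cut {c : Char} (h : pvIsCut c = false) : pvF c = c := by
  have h1 : c ∉ pvDelims := by
    intro hm
    simp [pvIsCut, hm] at h
  simp [pvF, h1]

lemma pv_go_acc : ∀ (cs cur : List Char) (acc : List (List Char)),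
    PySem.Chars.split₀.go cs cur acc = acc.reverse ++ PySem.Chars.split₀.go cs cur [] := by
  intro cs
  induction cs with
  | nil =>
    intro cur acc
    by_cases h : cur.isEmpty <;> simp [PySem.Chars.split₀.go, h]
  | cons c cs ih =>
    intro cur acc
    by_cases hsp : PySem.Chars.isspace c
    · by_cases hc : cur.isEmpty
      · simp only [PySem.Chars.split₀.go, hsp, hc, if_true]
        exact ih [] acc
      · simp only [PySem.Chars.split₀.go, hsp, hc, if_true, Bool.false_eq_true, if_false]
        rw [ih [] (cur.reverse :: acc), ih [] [cur.reverse]]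
        simp
    · simp only [PySem.Chars.split₀.go, hsp, Bool.false_eq_true, if_false]
      exact ih (c :: cur) acc

lemma pv_wordsA_append (ts us : List (List Char)) :
    pvWordsA (ts ++ us) = pvWordsA ts ++ pvWordsA us := by
  simp [pvWordsA]

lemma pv_flush_eq' (cur : List Char) (kept : List String) :
    pvFlush cur kept = kept ++ pvWordsA (if cur.isEmpty = true then [] else [cur]) := by
  cases cur with
  | nil => simp [pvFlush, pvWordsA]
  | cons c t =>
    unfold pvFlush pvWordsA
    simp only [List.isEmpty_cons, Bool.false_eq_true, if_false]
    by_cases h1 : c = '@' ∨ c = '#'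
    · have hcond : ¬((c :: t) ≠ [] ∧ (c :: t).head? ≠ some '@' ∧ (c :: t).head? ≠ some '#') := by
        rcases h1 with h | h <;> simp [h]
      rw [if_neg hcond, List.filter_cons]
      rw [show (!((c :: t).head? == some '@' || (c :: t).head? == some '#')) = false by
        rcases h1 with h | h <;> simp [h]]
      simp
    · have ha : ¬c = '@' := fun h => h1 (Or.inl h)
      have hbb : ¬c = '#' := fun h => h1 (Or.inr h)
      have hcond : ((c :: t) ≠ [] ∧ (c :: t).head? ≠ some '@' ∧ (c :: t).head? ≠ some '#') := by
        simp [ha, hbb]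
      rw [if_pos hcond, List.filter_cons]
      rw [show (!((c :: t).head? == some '@' || (c :: t).head? == some '#')) = true by simp [ha, hbb]]
      simp

lemma pv_flush_eq (cur : List Char) (kept : List String) :
    pvFlush cur kept = kept ++ pvWordsA (PySem.Chars.split₀.go [] cur.reverse []) := by
  have hgo : PySem.Chars.split₀.go [] cur.reverse [] = if cur.isEmpty = true then [] else [cur] := by
    cases h : cur.isEmpty
    · have h2 : cur.reverse.isEmpty = false := by rw [List.isEmpty_reverse, h]
      simp only [PySem.Chars.split₀.go, h2, Bool.false_eq_true, if_false, List.reverse_reverse]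
      rfl
    · have h2 : cur.reverse.isEmpty = true := by rw [List.isEmpty_reverse, h]
      simp only [PySem.Chars.split₀.go, h2, if_true]
      rfl
  rw [hgo, pv_flush_eq']

lemma pv_scan_eq : ∀ (cs cur : List Char) (kept : List String),
    pvScan cs cur kept = kept ++ pvWordsA (PySem.Chars.split₀.go (cs.map pvF) cur.reverse []) := by
  intro cs
  induction cs with
  | nil => intro cur kept; simpa [pvScan] using pv_flush_eq cur kept
  | cons c cs ih =>
    intro cur kept
    by_cases hcut : pvIsCut c
    · have hsp : PySem.Chars.isspace (pvF c) = true := by rw [pv_isspace_pvF, hcut]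
      simp only [pvScan, hcut, if_true, List.map_cons]
      rw [ih [] (pvFlush cur kept), pv_flush_eq' cur kept]
      cases hc : cur.isEmpty
      · simp only [PySem.Chars.split₀.go, hsp, if_true, List.isEmpty_reverse, hc,
          Bool.false_eq_true, if_false]
        rw [pv_go_acc (cs.map pvF) [] [cur.reverse.reverse], pv_wordsA_append]
        simp
      · simp only [PySem.Chars.split₀.go, hsp, if_true, List.isEmpty_reverse, hc]
        simp [pvWordsA]
    · have hf : pvF c = c := pv_pvF_of_not_cut (by simpa using hcut)
      have hsp : PySem.Chars.isspace c = false := by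
        have := pv_isspace_pvF c
        rw [hf] at this
        rw [this]; simpa using hcut
      simp only [pvScan, hcut, Bool.false_eq_true, if_false, List.map_cons, hf]
      rw [ih (cur ++ [c]) kept]
      simp [PySem.Chars.split₀.go, hsp]

lemma pv_dropWhile_isspace_of_free {t : List Char} (h : ∀ c ∈ t, PySem.Chars.isspace c = false) :
    List.dropWhile PySem.Chars.isspace t = t := by
  cases t with
  | nil => rfl
  | cons c t => simp [List.dropWhile, h c (List.mem_cons_self)]

lemma pv_strip_of_free {t : List Char} (h : ∀ c ∈ t, PySem.Chars.isspace c = false) :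
    PySem.Chars.strip t = t := by
  unfold PySem.Chars.strip PySem.Chars.lstrip PySem.Chars.rstrip
  rw [pv_dropWhile_isspace_of_free h]
  rw [pv_dropWhile_isspace_of_free (by intro c hc; exact h c (List.mem_reverse.mp hc))]
  simp

lemma pv_tok_prop : ∀ (cs cur : List Char) (acc : List (List Char)),
    (∀ c ∈ cur, PySem.Chars.isspace c = false) →
    (∀ t ∈ acc, t ≠ [] ∧ ∀ c ∈ t, PySem.Chars.isspace c = false) →
    ∀ t ∈ PySem.Chars.split₀.go cs cur acc, t ≠ [] ∧ ∀ c ∈ t, PySem.Chars.isspace c = false := by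
  intro cs
  induction cs with
  | nil =>
    intro cur acc hcur hacc t ht
    by_cases h : cur.isEmpty
    · simp only [PySem.Chars.split₀.go, h, if_true] at ht
      exact hacc t (List.mem_reverse.mp ht)
    · simp [PySem.Chars.split₀.go, h] at ht
      rcases ht with ht | rfl
      · exact hacc t ht
      · refine ⟨by simpa [List.isEmpty_iff] using h, ?_⟩
        intro c hc; exact hcur c (List.mem_reverse.mp hc)
  | cons c cs ih =>
    intro cur acc hcur hacc t ht
    by_cases hsp : PySem.Chars.isspace c
    · by_cases hc : cur.isEmpty
      · simp only [PySem.Chars.split₀.go, hsp, hc, if_true] at ht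
        exact ih [] acc (by simp) hacc t ht
      · simp only [PySem.Chars.split₀.go, hsp, hc, if_true, Bool.false_eq_true, if_false] at ht
        refine ih [] (cur.reverse :: acc) (by simp) ?_ t ht
        intro u hu
        rw [List.mem_cons] at hu
        rcases hu with rfl | hu
        · refine ⟨by simpa [List.isEmpty_iff] using hc, ?_⟩
          intro d hd; exact hcur d (List.mem_reverse.mp hd)
        · exact hacc u hu
    · simp only [PySem.Chars.split₀.go, hsp, Bool.false_eq_true, if_false] at ht
      refine ih (c :: cur) acc ?_ hacc t ht
      intro d hd
      rw [List.mem_cons] at hd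
      rcases hd with rfl | hd
      · simpa using hsp
      · exact hcur d hd

lemma pv_words_fold : ∀ (ts : List (List Char)) (ws : List String),
    (∀ t ∈ ts, t ≠ [] ∧ ∀ c ∈ t, PySem.Chars.isspace c = false) →
    (ts.map String.ofList).foldl (fun ws w =>
      let w := PySem.Str.strip w
      if w ≠ "" then
        if PySem.Str.pyGet? w 0 = some '@' ∨ PySem.Str.pyGet? w 0 = some '#' then ws
        else ws ++ [w]
      else ws) ws
    = ws ++ pvWordsA ts := by
  intro ts
  induction ts with
  | nil => intro ws _; simp [pvWordsA]
  | cons t ts ih =>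
    intro ws hts
    obtain ⟨hne, hfree⟩ := hts t List.mem_cons_self
    have hstrip : PySem.Str.strip (String.ofList t) = String.ofList t := by
      apply String.toList_inj.mp
      rw [PySem.Str.toList_strip, String.toList_ofList, pv_strip_of_free hfree]
    have hts' : ∀ u ∈ ts, u ≠ [] ∧ ∀ c ∈ u, PySem.Chars.isspace c = false :=
      fun u hu => hts u (List.mem_cons_of_mem _ hu)
    have hnee : String.ofList t ≠ "" := by
      intro h
      exact hne (by simpa using congrArg String.toList h)
    have hget : PySem.Str.pyGet? (String.ofList t) 0 = t.head? := by
      simp only [show ((0:Int)) = ((0:Nat):Int) from rfl, PySem.Str.pyGet?_natCast,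
        String.toList_ofList]
      cases t with
      | nil => exact absurd rfl hne
      | cons c0 t0 => simp
    simp only [List.map_cons, List.foldl, hstrip]
    rw [if_pos hnee]
    by_cases h1 : t.head? = some '@' ∨ t.head? = some '#'
    · have hb : (t.head? == some '@' || t.head? == some '#') = true := by
        rcases h1 with h | h <;> simp [h]
      rw [if_pos (by rw [hget]; exact h1), ih ws hts']
      simp [pvWordsA, List.filter, hb]
    · have hb : (t.head? == some '@' || t.head? == some '#') = false := by
        simp only [Bool.or_eq_false_iff, beq_eq_false_iff_ne]
        exact ⟨fun h => h1 (Or.inl h), fun h => h1 (Or.inr h)⟩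
      rw [if_neg (by rw [hget]; exact h1), ih (ws ++ [String.ofList t]) hts']
      simp [pvWordsA, List.filter, hb]

-- ===== VERDICT (by name: the statement is the Claim_ definition above) =====
theorem strip_all_entities_spec : Claim_equal_strip_all_entities := by
  intro text _
  unfold Spec_strip_all_entities
  have htok := pv_tok_prop (text.toList.map pvF) [] [] (by simp) (by simp)
  have hsplit : PySem.Str.split₀
      (pvPunctuation.foldl (fun t sep =>
        if sep = '@' ∨ sep = '#' then t
        else PySem.Str.replace t (String.ofList [sep]) " ") text)
      = (PySem.Chars.split₀.go (text.toList.map pvF) [] []).map String.ofList := by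
    unfold PySem.Str.split₀ PySem.Chars.split₀
    rw [pv_tA_toList]
  have hA : strip_all_entities text
      = PySem.Str.join " " ([] ++ pvWordsA (PySem.Chars.split₀.go (text.toList.map pvF) [] [])) := by
    simp only [strip_all_entities]
    rw [hsplit, pv_words_fold _ [] htok]
  have hB : strip_all_entities_alt text
      = PySem.Str.join " " ([] ++ pvWordsA (PySem.Chars.split₀.go (text.toList.map pvF) [] [])) := by
    simp only [strip_all_entities_alt]
    rw [pv_scan_eq]
    rfl
  rw [hA, hB]
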